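-- pv_equiv track=rewrite | github.com/pypi-data/pypi-mirror-339 | packages/concernbert/concernbert-0.0.5-py3-none-any.whl/concernbert/semantic.py | _join_singles
-- ===== SOURCE A (Python) =====
-- def _join_singles(terms: list[str]) -> list[str]:
--     ret = []
--     joined_term = []
--     for t in terms:
--         if len(t) == 1:
--             joined_term.append(t[0])
--         elif len(t) > 1:
--             if len(joined_term) > 0:
--                 ret.append("".join(joined_term))
--                 joined_term = []
--             ret.append(t)
--     if len(joined_term) > 0:
--         ret.append("".join(joined_term))
--     return ret
-- ===== SOURCE B (Python) =====
-- def _join_singles(terms: list[str]) -> list[str]: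
--     # Two-phase: drop empty terms (they are transparent), then split the
--     # remainder into maximal runs of single-char terms and join each run.
--     items = [t for t in terms if t]
--     out = []
--     i = 0
--     n = len(items)
--     while i < n:
--         if len(items[i]) == 1:
--             j = i
--             while j < n and len(items[j]) == 1:
--                 j += 1
--             out.append("".join(items[i:j]))
--             i = j
--         else:
--             out.append(items[i])
--             i += 1
--     return out
-- ===== Notes on version B (the rewrite author's own statement) =====
-- stated objective: alternative
-- what changed: Replaces A's stateful accumulate-and-flush loop (a pending joined_term buffer flushed at multi-char terms and at the end) with a two-phase traversal: filter out empty terms, then split the list into maximal runs of single-char terms by forward scanning and join each run in place, with no pending state across iterations.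
import Mathlib
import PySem

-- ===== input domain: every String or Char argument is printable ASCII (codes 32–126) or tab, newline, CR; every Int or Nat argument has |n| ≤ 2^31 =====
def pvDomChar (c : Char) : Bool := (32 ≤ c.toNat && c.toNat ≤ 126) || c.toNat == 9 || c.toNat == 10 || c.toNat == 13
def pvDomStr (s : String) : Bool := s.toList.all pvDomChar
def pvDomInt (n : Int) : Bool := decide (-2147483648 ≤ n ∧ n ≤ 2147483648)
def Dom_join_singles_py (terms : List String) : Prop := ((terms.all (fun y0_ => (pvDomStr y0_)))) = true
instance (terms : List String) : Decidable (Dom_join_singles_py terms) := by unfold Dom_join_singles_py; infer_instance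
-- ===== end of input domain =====

-- B replaces A's accumulate-and-flush loop with a two-phase traversal (filter empties,
-- then split into maximal single-char runs and join each run): alternative decomposition, same cost.

-- ===== PORT A =====
-- A's loop state is (ret, joined_term); joined_term holds the chars t[0]
-- ("".join of Python's 1-char strings = String.ofList of those chars, exact on this domain).
def pvAStep (st : List String × List Char) (t : String) : List String × List Char :=
  if PySem.Str.len t = 1 then
    -- joined_term.append(t[0]); t[0] via pyGet? (len t = 1 ⇒ some char, Option.toList = that one char)
    (st.1, st.2 ++ (PySem.Str.pyGet? t 0).toList)
  else if 1 < PySem.Str.len t then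
    if 0 < st.2.length then (st.1 ++ [String.ofList st.2] ++ [t], [])
    else (st.1 ++ [t], st.2)
  else st

def join_singles_py (terms : List String) : List String :=
  let st := terms.foldl pvAStep ([], [])
  if 0 < st.2.length then st.1 ++ [String.ofList st.2] else st.1

-- ===== PORT B =====
-- Source B's inner while-loop scans the maximal run of single-char items (items[i:j]) and
-- joins it; here that forward scan is takeWhile/dropWhile on the same predicate.
def pvIsSingle (u : String) : Bool := PySem.Str.len u == 1

def pvBGo : List String → List String
  | [] => []
  | t :: ts =>
    if pvIsSingle t then
      PySem.Str.join "" (t :: ts.takeWhile pvIsSingle) :: pvBGo (ts.dropWhile pvIsSingle)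
    else
      t :: pvBGo ts
termination_by xs => xs.length
decreasing_by
  · exact Nat.lt_succ_of_le (List.length_dropWhile_le _ _)
  · simp

def join_singles_py_alt (terms : List String) : List String :=
  pvBGo (terms.filter (fun t => !(PySem.Str.len t == 0)))

-- ===== PRECONDITION & SPEC =====
def Spec_join_singles_py (terms : List String) (out : List String) : Prop := out = join_singles_py_alt terms
instance (terms : List String) (out : List String) : Decidable (Spec_join_singles_py terms out) := by unfold Spec_join_singles_py; infer_instance

-- ===== CLAIM (what is proved, stated in full; the proofs are below) =====
def Claim_equal_join_singles_py : Prop := ∀ (terms : List String), Dom_join_singles_py terms → Spec_join_singles_py terms (join_singles_py terms)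

-- ===== LEMMAS AND PROOFS =====

-- Common specification: process the remaining terms, carrying the pending chars p.
def pvFlush (p : List Char) : List String := if p = [] then [] else [String.ofList p]

def pvSpecF : List Char → List String → List String
  | p, [] => pvFlush p
  | p, t :: ts =>
    if t.length = 1 then pvSpecF (p ++ t.toList) ts
    else if 1 < t.length then pvFlush p ++ t :: pvSpecF [] ts
    else pvSpecF p ts

-- the final flush of port A, as a function (join_singles_py terms = pvAFin (foldl …) by rfl)
def pvAFin (st : List String × List Char) : List String :=
  if 0 < st.2.length then st.1 ++ [String.ofList st.2] else st.1

theorem pv_single_toList (t : String) (h : t.length = 1) : ∃ c, t.toList = [c] := by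
  apply List.length_eq_one_iff.mp; simpa using h

-- step lemmas evaluating pvAStep under each length case
theorem pvAStep_one (ret : List String) (p : List Char) (t : String) (h : t.length = 1) :
    pvAStep (ret, p) t = (ret, p ++ t.toList) := by
  obtain ⟨c, hc⟩ := pv_single_toList t h
  simp [pvAStep, PySem.Str.pyGet?, hc, PySem.Chars.pyGet?_eq_listPyGet?]

theorem pvAStep_big_pos (ret : List String) (p : List Char) (t : String)
    (h : 1 < t.length) (hp : p ≠ []) :
    pvAStep (ret, p) t = (ret ++ [String.ofList p] ++ [t], []) := by
  have hpl : 0 < p.length := List.length_pos_iff.mpr hp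
  simp [pvAStep, hpl]
  rw [if_neg (by omega), if_pos h]

theorem pvAStep_big_nil (ret : List String) (t : String) (h : 1 < t.length) :
    pvAStep (ret, []) t = (ret ++ [t], []) := by
  simp [pvAStep]
  rw [if_neg (by omega), if_pos h]

theorem pvAStep_zero (ret : List String) (p : List Char) (t : String) (h : t.length = 0) :
    pvAStep (ret, p) t = (ret, p) := by
  simp [pvAStep, h]

-- A's fold with state (ret, p), followed by the final flush, is ret ++ pvSpecF p ts.
theorem pvA_eq (ts : List String) : ∀ (ret : List String) (p : List Char),
    pvAFin (ts.foldl pvAStep (ret, p)) = ret ++ pvSpecF p ts := by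
  induction ts with
  | nil =>
    intro ret p
    cases p <;> simp [pvAFin, pvSpecF, pvFlush]
  | cons t ts ih =>
    intro ret p
    rcases h1 : t.length with _ | _ | n
    · rw [List.foldl_cons, pvAStep_zero ret p t h1, ih ret p, pvSpecF]
      simp [h1]
    · rw [List.foldl_cons, pvAStep_one ret p t h1, ih ret (p ++ t.toList), pvSpecF]
      simp [h1]
    · have hgt : 1 < t.length := by omega
      rcases hp : p with _ | ⟨c, cs⟩
      · rw [List.foldl_cons, pvAStep_big_nil ret t hgt, ih (ret ++ [t]) [], pvSpecF]
        simp [pvFlush, h1]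
      · rw [List.foldl_cons, pvAStep_big_pos ret (c :: cs) t hgt (by simp),
            ih (ret ++ [String.ofList (c :: cs)] ++ [t]) [], pvSpecF]
        simp [pvFlush, h1]

theorem pv_join_nil_flatten (l : List (List Char)) : PySem.Chars.join [] l = l.flatten := by
  induction l with
  | nil => simp [PySem.Chars.join, List.intercalate]
  | cons c l ih => cases l <;> simp_all [PySem.Chars.join, List.intercalate]

-- consuming a run of single-char terms just extends the pending buffer
theorem pvSpecF_singles (run : List String) : ∀ (p : List Char) (rest : List String),
    (∀ u ∈ run, u.length = 1) →
    pvSpecF p (run ++ rest) = pvSpecF (p ++ (run.map String.toList).flatten) rest := by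
  induction run with
  | nil => intro p rest _; simp
  | cons u run ih =>
    intro p rest h
    have hu : u.length = 1 := h u (by simp)
    simp only [List.cons_append, pvSpecF, hu, if_pos]
    rw [ih (p ++ u.toList) rest (fun v hv => h v (by simp [hv]))]
    simp

theorem pv_isSingle_iff (u : String) : pvIsSingle u = true ↔ u.length = 1 := by
  simp [pvIsSingle, PySem.Str.len_eq]

-- B's run-splitting recursion computes pvSpecF [] on a list without empty terms.
theorem pvB_eq (xs : List String) (hne : ∀ t ∈ xs, t.length ≠ 0) :
    pvBGo xs = pvSpecF [] xs := by
  induction xs using pvBGo.induct with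
  | case1 => simp [pvBGo, pvSpecF, pvFlush]
  | case2 t ts h ih =>
    have h1 : t.length = 1 := (pv_isSingle_iff t).mp h
    have hrun : ∀ u ∈ ts.takeWhile pvIsSingle, u.length = 1 := by
      intro u hu
      exact (pv_isSingle_iff u).mp (List.mem_takeWhile_imp hu)
    have hsplit : ts = ts.takeWhile pvIsSingle ++ ts.dropWhile pvIsSingle :=
      (List.takeWhile_append_dropWhile).symm
    rw [pvBGo]
    simp only [h, if_pos]
    have hrest : ∀ t' ∈ ts.dropWhile pvIsSingle, t'.length ≠ 0 := by
      intro t' ht'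
      exact hne t' (by right; rw [hsplit]; exact List.mem_append_right _ ht')
    rw [ih hrest]
    -- evaluate pvSpecF [] (t :: ts): head is single, then the rest of the run
    have hstep : pvSpecF [] (t :: ts) =
        pvSpecF (t.toList ++ ((ts.takeWhile pvIsSingle).map String.toList).flatten)
          (ts.dropWhile pvIsSingle) := by
      conv_lhs => rw [hsplit]
      simp only [pvSpecF, h1, if_pos, List.nil_append]
      rw [show pvSpecF t.toList (ts.takeWhile pvIsSingle ++ ts.dropWhile pvIsSingle) =
            pvSpecF (t.toList ++ ((ts.takeWhile pvIsSingle).map String.toList).flatten)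
              (ts.dropWhile pvIsSingle) from pvSpecF_singles _ _ _ hrun]
    rw [hstep]
    -- the joined run equals the string of the accumulated chars
    obtain ⟨c, hc⟩ := pv_single_toList t h1
    have hjoin : PySem.Str.join "" (t :: ts.takeWhile pvIsSingle) =
        String.ofList (t.toList ++ ((ts.takeWhile pvIsSingle).map String.toList).flatten) := by
      rw [← String.toList_inj]
      simp [PySem.Str.toList_join, pv_join_nil_flatten]
    cases hdrop : ts.dropWhile pvIsSingle with
    | nil =>
      simp only [pvSpecF, pvFlush]
      simp [hjoin, hc]
    | cons r rs =>
      have hne' : ts.dropWhile pvIsSingle ≠ [] := by rw [hdrop]; exact List.cons_ne_nil _ _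
      have hhead := List.head_dropWhile_not pvIsSingle hne'
      have hh : (ts.dropWhile pvIsSingle).head hne' = r := by simp [hdrop]
      rw [hh] at hhead
      have hr1 : r.length ≠ 1 := fun hr => by
        rw [(pv_isSingle_iff r).mpr hr] at hhead; cases hhead
      have hrne : r.length ≠ 0 := hrest r (by simp [hdrop])
      have hrgt : 1 < r.length := by omega
      simp only [pvSpecF, hr1, hrgt, if_pos, pvFlush]
      simp [hjoin, hc]
  | case3 t ts h ih =>
    have h1 : t.length ≠ 1 := fun hr => h ((pv_isSingle_iff t).mpr hr)
    have htne : t.length ≠ 0 := hne t (by simp)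
    have hgt : 1 < t.length := by omega
    rw [pvBGo]
    simp only [h, if_neg, Bool.false_eq_true, not_false_iff]
    rw [ih (fun u hu => hne u (by simp [hu]))]
    simp [pvSpecF, h1, hgt, pvFlush]

-- pvSpecF ignores empty terms, so filtering them out first changes nothing.
theorem pvSpecF_filter (ts : List String) : ∀ (p : List Char),
    pvSpecF p (ts.filter (fun t => !(t.length == 0))) = pvSpecF p ts := by
  induction ts with
  | nil => intro p; simp
  | cons t ts ih =>
    intro p
    rcases h1 : t.length with _ | _ | n
    · simp [pvSpecF, h1, ih]
    · simp [pvSpecF, h1, ih]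
    · have hgt : 1 < t.length := by omega
      have hne : t.length ≠ 0 := by omega
      have hn1 : t.length ≠ 1 := by omega
      simp [pvSpecF, hgt, hne, hn1, ih]

-- ===== VERDICT (by name: the statement is the Claim_ definition above) =====
theorem join_singles_py_spec : Claim_equal_join_singles_py := by
  intro terms _
  unfold Spec_join_singles_py join_singles_py join_singles_py_alt
  rw [show (let st := terms.foldl pvAStep ([], []);
        if 0 < st.2.length then st.1 ++ [String.ofList st.2] else st.1) =
      pvAFin (terms.foldl pvAStep ([], [])) from rfl]
  rw [pvA_eq terms [] []]
  rw [show terms.filter (fun t => !(PySem.Str.len t == 0)) =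
        terms.filter (fun t => !(t.length == 0)) from
      List.filter_congr (fun t _ => by simp [PySem.Str.len_eq])]
  rw [pvB_eq _ (by intro t ht
                   simpa using (List.mem_filter.mp ht).2)]
  rw [pvSpecF_filter]
  simp
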